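-- pv_equiv track=rewrite | github.com/Flash0673/GitLab_Parser | Parser.py | find_key_words_message
-- ===== SOURCE A (Python) =====
-- def find_key_words_message(message):
--     """
--     Возвращает ключевые слов
--     :param message: commit message
--     :return:
--     """
--     key_words = ["remove", "merge branch", "fix", "add",
--                      "update", "change", "release", "correct", "replace",
--                      "deleted", "refactor", "clean", "test", "minor", "prepar",
--                      "move", "feature", "optimization", "resolv", "improve",
--                      "feat", "rename", "debug"]
--     res = []
--     temp = message.split()
--     for key_word in key_words:
--         for word in temp:
--             if word.lower().startswith(key_word):
--                 if key_word == "prepar":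
--                     res.append("prepare")
--                 if key_word == "resolv":
--                     res.append("resolve")
--                 res.append(key_word)
--     return res
-- ===== SOURCE B (Python) =====
-- def find_key_words_message(message):
--     key_words = ["remove", "merge branch", "fix", "add",
--                  "update", "change", "release", "correct", "replace",
--                  "deleted", "refactor", "clean", "test", "minor", "prepar",
--                  "move", "feature", "optimization", "resolv", "improve",
--                  "feat", "rename", "debug"]
--     buckets = {k: [] for k in key_words}
--     for word in message.split():
--         w = word.lower()
--         for k in key_words:
--             if w.startswith(k):
--                 entry = []
--                 if k == "prepar":
--                     entry.append("prepare")
--                 if k == "resolv":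
--                     entry.append("resolve")
--                 entry.append(k)
--                 buckets[k] += entry
--     res = []
--     for k in key_words:
--         res += buckets[k]
--     return res
-- ===== Notes on version B (the rewrite author's own statement) =====
-- stated objective: faster
-- what changed: A scans the whole word list once per keyword (23 passes, re-lowercasing every word each pass); B makes a single pass over the words, lowercasing each word once and bucketing matches into a per-keyword dict, then concatenates the buckets in the fixed keyword order.
import Mathlib
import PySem

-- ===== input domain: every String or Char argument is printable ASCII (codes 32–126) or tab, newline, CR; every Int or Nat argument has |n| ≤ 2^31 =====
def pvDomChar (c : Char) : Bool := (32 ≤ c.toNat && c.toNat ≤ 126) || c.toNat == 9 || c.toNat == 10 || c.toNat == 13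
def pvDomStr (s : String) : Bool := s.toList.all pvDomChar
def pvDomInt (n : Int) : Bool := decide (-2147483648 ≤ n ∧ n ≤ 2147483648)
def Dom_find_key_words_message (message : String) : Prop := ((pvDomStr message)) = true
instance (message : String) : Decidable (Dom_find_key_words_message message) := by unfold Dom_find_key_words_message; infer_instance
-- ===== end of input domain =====

-- B replaces A's one-scan-of-the-words-per-keyword structure by a single pass over the
-- words that buckets matches per keyword in a dict, then emits the buckets in keyword
-- order (one pass over the words, each lowercased once, instead of 23; a timing run
-- measured B faster at the largest size).


-- the keyword literal shared by both Python sources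
def pvKeyWords : List String :=
  ["remove", "merge branch", "fix", "add",
   "update", "change", "release", "correct", "replace",
   "deleted", "refactor", "clean", "test", "minor", "prepar",
   "move", "feature", "optimization", "resolv", "improve",
   "feat", "rename", "debug"]

-- ===== PORT A =====
def find_key_words_message (message : String) : List String :=
  let temp := PySem.Str.split₀ message
  pvKeyWords.foldl (fun res key_word =>
    temp.foldl (fun res word =>
      if PySem.Str.startswith (PySem.Str.lower word) key_word then
        ((res ++ (if key_word == "prepar" then ["prepare"] else []))
              ++ (if key_word == "resolv" then ["resolve"] else [])) ++ [key_word]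
      else res) res) []

-- ===== PORT B =====
def find_key_words_message_alt (message : String) : List String :=
  let buckets0 : PySem.Dict String (List String) :=
    pvKeyWords.foldl (fun d k => d.insert k []) PySem.Dict.empty
  let buckets :=
    (PySem.Str.split₀ message).foldl (fun d word =>
      let w := PySem.Str.lower word
      pvKeyWords.foldl (fun d k =>
        if PySem.Str.startswith w k then
          let entry := ((if k == "prepar" then ["prepare"] else [])
                          ++ (if k == "resolv" then ["resolve"] else [])) ++ [k]
          d.modify k [] (· ++ entry)
        else d) d) buckets0
  pvKeyWords.foldl (fun res k => res ++ buckets.getD k []) []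

-- ===== PRECONDITION & SPEC =====
def Spec_find_key_words_message (message : String) (out : List String) : Prop := out = find_key_words_message_alt message
instance (message : String) (out : List String) : Decidable (Spec_find_key_words_message message out) := by unfold Spec_find_key_words_message; infer_instance

-- ===== CLAIM (what is proved, stated in full; the proofs are below) =====
def Claim_equal_find_key_words_message : Prop := ∀ (message : String), Dom_find_key_words_message message → Spec_find_key_words_message message (find_key_words_message message)

-- ===== LEMMAS AND PROOFS =====

-- the chunk both programs append for one match of keyword k
def pvEmit (k : String) : List String :=
  ((if k == "prepar" then ["prepare"] else [])
     ++ (if k == "resolv" then ["resolve"] else [])) ++ [k]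

-- A's inner word loop appends pvEmit k per matching word
theorem pvA_inner (k : String) (ws : List String) (res : List String) :
    ws.foldl (fun res word =>
      if PySem.Str.startswith (PySem.Str.lower word) k then
        ((res ++ (if k == "prepar" then ["prepare"] else []))
              ++ (if k == "resolv" then ["resolve"] else [])) ++ [k]
      else res) res
    = res ++ ws.flatMap (fun w => if PySem.Str.startswith (PySem.Str.lower w) k then pvEmit k else []) := by
  have h : (fun res word =>
      if PySem.Str.startswith (PySem.Str.lower word) k then
        ((res ++ (if k == "prepar" then ["prepare"] else []))
              ++ (if k == "resolv" then ["resolve"] else [])) ++ [k]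
      else res)
      = (fun (res : List String) word =>
          res ++ (if PySem.Str.startswith (PySem.Str.lower word) k then pvEmit k else [])) := by
    funext res word
    by_cases hm : PySem.Chars.startswith (PySem.Chars.lower word.toList) k.toList = true
    · simp [hm, pvEmit]
    · simp [hm]
  rw [h, PySem.List.foldl_append_eq_flatMap]

-- the init dict has empty buckets everywhere
theorem pvInit_getD (kws : List String) (c : String) (d : PySem.Dict String (List String))
    (hd : d.getD c [] = []) :
    (kws.foldl (fun d k => d.insert k []) d).getD c [] = [] := by
  induction kws generalizing d with
  | nil => simpa using hd
  | cons k rest ih =>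
      simp only [List.foldl_cons]
      apply ih
      by_cases hck : c = k
      · subst hck; simp [PySem.Dict.getD_insert_self]
      · simp [PySem.Dict.getD_insert_of_ne _ _ _ hck, hd]

-- one word's keyword loop touches bucket c exactly when c matches (kws without duplicates)
theorem pvB_inner (w : String) (kws : List String) (hk : kws.Nodup) (c : String)
    (d : PySem.Dict String (List String)) :
    (kws.foldl (fun d k =>
        if PySem.Str.startswith (PySem.Str.lower w) k then
          d.modify k [] (· ++ pvEmit k)
        else d) d).getD c []
    = d.getD c [] ++ (if c ∈ kws ∧ PySem.Str.startswith (PySem.Str.lower w) c then pvEmit c else []) := by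
  induction kws generalizing d with
  | nil => simp
  | cons k rest ih =>
      have hkr : k ∉ rest := (List.nodup_cons.mp hk).1
      have hrest : rest.Nodup := (List.nodup_cons.mp hk).2
      simp only [List.foldl_cons]
      rw [ih hrest]
      by_cases hck : c = k
      · subst hck
        have hc : c ∉ rest := hkr
        by_cases hm : PySem.Chars.startswith (PySem.Chars.lower w.toList) c.toList = true
        · simp [hm, hc, PySem.Dict.getD_modify_self]
        · simp [hm, hc]
      · have hgd : ∀ (d' : PySem.Dict String (List String)),
            ((if PySem.Str.startswith (PySem.Str.lower w) k then
                d'.modify k [] (· ++ pvEmit k) else d')).getD c [] = d'.getD c [] := by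
          intro d'
          by_cases hm : PySem.Chars.startswith (PySem.Chars.lower w.toList) k.toList = true
          · simp [hm, PySem.Dict.getD_modify_of_ne _ _ _ hck]
          · simp [hm]
        rw [hgd]
        by_cases hcr : c ∈ rest
        · simp [hcr, hck]
        · simp [hcr, hck]

-- the word pass fills bucket c with pvEmit c per matching word, in word order
theorem pvB_pass (ws : List String) (c : String)
    (d : PySem.Dict String (List String)) :
    (ws.foldl (fun d word =>
        pvKeyWords.foldl (fun d k =>
          if PySem.Str.startswith (PySem.Str.lower word) k then
            d.modify k [] (· ++ pvEmit k)
          else d) d) d).getD c []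
    = d.getD c [] ++ ws.flatMap (fun w =>
        if c ∈ pvKeyWords ∧ PySem.Str.startswith (PySem.Str.lower w) c then pvEmit c else []) := by
  induction ws generalizing d with
  | nil => simp
  | cons w rest ih =>
      simp only [List.foldl_cons, List.flatMap_cons]
      rw [ih, pvB_inner w pvKeyWords (by decide) c d, List.append_assoc]

-- ===== VERDICT (by name: the statement is the Claim_ definition above) =====
theorem find_key_words_message_spec : Claim_equal_find_key_words_message := by
  intro message _
  unfold Spec_find_key_words_message
  have hA : find_key_words_message message
      = pvKeyWords.flatMap (fun k => (PySem.Str.split₀ message).flatMap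
          (fun w => if PySem.Str.startswith (PySem.Str.lower w) k then pvEmit k else [])) := by
    unfold find_key_words_message
    show pvKeyWords.foldl _ [] = _
    have hF : (fun res key_word =>
        (PySem.Str.split₀ message).foldl (fun res word =>
          if PySem.Str.startswith (PySem.Str.lower word) key_word then
            ((res ++ (if key_word == "prepar" then ["prepare"] else []))
                  ++ (if key_word == "resolv" then ["resolve"] else [])) ++ [key_word]
          else res) res)
        = (fun (res : List String) k => res ++ (PySem.Str.split₀ message).flatMap
            (fun w => if PySem.Str.startswith (PySem.Str.lower w) k then pvEmit k else [])) := by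
      funext res k
      exact pvA_inner k (PySem.Str.split₀ message) res
    rw [hF, PySem.List.foldl_append_eq_flatMap]
    simp
  have hB : find_key_words_message_alt message
      = pvKeyWords.flatMap (fun k => (PySem.Str.split₀ message).flatMap
          (fun w => if PySem.Str.startswith (PySem.Str.lower w) k then pvEmit k else [])) := by
    unfold find_key_words_message_alt
    show pvKeyWords.foldl _ [] = _
    rw [PySem.List.foldl_append_eq_flatMap]
    simp only [List.nil_append]
    apply List.flatMap_congr
    intro k hk
    have hinit : (pvKeyWords.foldl (fun d k => d.insert k [])
        (PySem.Dict.empty : PySem.Dict String (List String))).getD k [] = [] :=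
      pvInit_getD pvKeyWords k PySem.Dict.empty (by
        simp [PySem.Dict.getD, PySem.Dict.empty, PySem.Dict.get?])
    have hpass := pvB_pass (PySem.Str.split₀ message) k
      (pvKeyWords.foldl (fun d k => d.insert k []) PySem.Dict.empty)
    simp only [pvEmit] at hpass
    rw [hpass, hinit, List.nil_append]
    apply List.flatMap_congr
    intro w _
    simp [hk, pvEmit]
  rw [hA, hB]
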